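-- pv_equiv track=rewrite | github.com/linsonglnkd/coursera-algorithm-thinking-rice | week4/project.py | build_scoring_matrix
-- ===== SOURCE A (Python) =====
-- def build_scoring_matrix(alphabet, diag_score, off_diag_score, dash_score):
--     '''
--     Takes as input a set of characters alphabet and three scores
--     diag_score, off_diag_score, and dash_score. The function returns
--     a dictionary of dictionaries whose entries are indexed by pairs of
--     characters in alphabet plus '-'. The score for any entry indexed by
--     one or more dashes is dash_score. The score for the remaining diagonal
--     entries is diag_score. Finally, the score for the remaining off-diagonal
--     entries is off_diag_score.
--     '''
--     result = {}
--     alphabet_list = list(alphabet)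
--     alphabet_list.append("-")
--     for idx_i in range(len(alphabet_list)):
--         first_letter = alphabet_list[idx_i]
--         result[first_letter] = {}
--         for idx_j in range(len(alphabet_list)):
--             second_letter = alphabet_list[idx_j]
--             if first_letter == "-" or second_letter == "-":
--                 result[first_letter][second_letter] = dash_score
--             elif first_letter == second_letter:
--                 result[first_letter][second_letter] = diag_score
--             else:
--                 result[first_letter][second_letter] = off_diag_score
--     return result
-- ===== SOURCE B (Python) =====
-- def build_scoring_matrix(alphabet, diag_score, off_diag_score, dash_score):
--     letters = list(alphabet)
--     letters.append("-")
--     # shared template row: off_diag everywhere, dash in the '-' column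
--     base = dict.fromkeys(letters, off_diag_score)
--     base["-"] = dash_score
--     # the whole dash row is constant
--     dash_row = dict.fromkeys(letters, dash_score)
--     result = {}
--     for letter in letters:
--         if letter == "-":
--             result[letter] = dict(dash_row)
--         else:
--             row = dict(base)
--             row[letter] = diag_score
--             result[letter] = row
--     return result
-- ===== Notes on version B (the rewrite author's own statement) =====
-- stated objective: alternative
-- what changed: B has no per-cell computation at all: it builds one shared template row (off_diag everywhere, dash in the '-' column) and one constant dash row once, then each row of the result is a dict copy of the template patched at its single diagonal entry (or a copy of the dash row for '-'), replacing A's nested loop with a three-way branch in every cell.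
import Mathlib
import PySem

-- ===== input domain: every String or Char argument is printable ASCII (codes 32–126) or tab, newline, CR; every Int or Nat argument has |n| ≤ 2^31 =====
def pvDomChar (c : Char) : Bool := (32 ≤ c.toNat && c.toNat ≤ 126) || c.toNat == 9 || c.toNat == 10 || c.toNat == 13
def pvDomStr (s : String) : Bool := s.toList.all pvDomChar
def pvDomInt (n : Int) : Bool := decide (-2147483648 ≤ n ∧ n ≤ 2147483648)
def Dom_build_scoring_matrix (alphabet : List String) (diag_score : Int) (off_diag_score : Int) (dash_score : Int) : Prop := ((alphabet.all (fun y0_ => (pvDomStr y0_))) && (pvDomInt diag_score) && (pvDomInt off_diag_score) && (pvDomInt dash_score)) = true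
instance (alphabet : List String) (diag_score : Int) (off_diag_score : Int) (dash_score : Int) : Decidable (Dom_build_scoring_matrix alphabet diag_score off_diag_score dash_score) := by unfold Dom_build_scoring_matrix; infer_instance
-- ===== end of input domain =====

-- B replaces A's per-cell three-way branch by one shared template row copied and patched
-- at a single entry per row (constant dash row for '-'); objective: alternative
-- decomposition, same asymptotic cost.

-- ===== PORT A =====
-- 'result[first][second] = v' is ported as Dict.modify with default empty; the key
-- 'first' is always present at that point ('result[first] = {}' just ran), so this is exact.
def build_scoring_matrix (alphabet : List String) (diag_score : Int) (off_diag_score : Int) (dash_score : Int) : List (String × List (String × Int)) :=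
  let alphabet_list := alphabet ++ ["-"]
  let result : PySem.Dict String (PySem.Dict String Int) :=
    alphabet_list.foldl (fun result first_letter =>
      let result := result.insert first_letter PySem.Dict.empty
      alphabet_list.foldl (fun result second_letter =>
        result.modify first_letter PySem.Dict.empty (fun row =>
          row.insert second_letter
            (if first_letter = "-" ∨ second_letter = "-" then dash_score
             else if first_letter = second_letter then diag_score
             else off_diag_score))) result) PySem.Dict.empty
  result.items.map (fun p => (p.1, p.2.items))

-- ===== PORT B =====
-- 'dict.fromkeys(letters, v)' is an insert fold; 'dict(x)' (a copy) is the identity on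
-- the immutable Dict value, so the copies in Source B are the shared values themselves.
def build_scoring_matrix_alt (alphabet : List String) (diag_score : Int) (off_diag_score : Int) (dash_score : Int) : List (String × List (String × Int)) :=
  let letters := alphabet ++ ["-"]
  -- base = dict.fromkeys(letters, off_diag_score); base["-"] = dash_score
  let base : PySem.Dict String Int :=
    (letters.foldl (fun d k => d.insert k off_diag_score) PySem.Dict.empty).insert "-" dash_score
  -- dash_row = dict.fromkeys(letters, dash_score)
  let dash_row : PySem.Dict String Int :=
    letters.foldl (fun d k => d.insert k dash_score) PySem.Dict.empty
  let result : PySem.Dict String (PySem.Dict String Int) :=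
    letters.foldl (fun res letter =>
      if letter = "-" then res.insert letter dash_row
      else res.insert letter (base.insert letter diag_score)) PySem.Dict.empty
  result.items.map (fun p => (p.1, p.2.items))

-- ===== PRECONDITION & SPEC =====
def Spec_build_scoring_matrix (alphabet : List String) (diag_score : Int) (off_diag_score : Int) (dash_score : Int) (out : List (String × List (String × Int))) : Prop := out = build_scoring_matrix_alt alphabet diag_score off_diag_score dash_score
instance (alphabet : List String) (diag_score : Int) (off_diag_score : Int) (dash_score : Int) (out : List (String × List (String × Int))) : Decidable (Spec_build_scoring_matrix alphabet diag_score off_diag_score dash_score out) := by unfold Spec_build_scoring_matrix; infer_instance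

-- ===== CLAIM (what is proved, stated in full; the proofs are below) =====
def Claim_equal_build_scoring_matrix : Prop := ∀ (alphabet : List String) (diag_score : Int) (off_diag_score : Int) (dash_score : Int), Dom_build_scoring_matrix alphabet diag_score off_diag_score dash_score → Spec_build_scoring_matrix alphabet diag_score off_diag_score dash_score (build_scoring_matrix alphabet diag_score off_diag_score dash_score)

-- ===== LEMMAS AND PROOFS =====

-- two dicts with the same (duplicate-free) key list and the same lookups are equal
theorem pv_dict_eq_of_keys_getD {ν : Type} (d d' : PySem.Dict String ν)
    (hk : d.keys = d'.keys) (hnd : d.keys.Nodup) (dflt : ν)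
    (h : ∀ k ∈ d.keys, d.getD k dflt = d'.getD k dflt) : d = d' := by
  apply PySem.Dict.ext
  rw [PySem.Dict.items_eq_map_keys d hnd dflt, PySem.Dict.items_eq_map_keys d' (hk ▸ hnd) dflt, ← hk]
  exact List.map_congr_left fun k hkmem => by rw [h k hkmem]

-- lookup after an insert-loop whose value depends only on the loop variable
theorem pv_getD_foldl_insert_fn {ν : Type} (v : String → ν) (ls : List String)
    (d : PySem.Dict String ν) (k : String) (dflt : ν) :
    (ls.foldl (fun r s => r.insert s (v s)) d).getD k dflt
      = if k ∈ ls then v k else d.getD k dflt := by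
  induction ls generalizing d with
  | nil => simp
  | cons c ls ih =>
      simp only [List.foldl_cons, ih, PySem.Dict.getD_insert, List.mem_cons]
      by_cases h1 : k ∈ ls <;> by_cases h2 : k = c <;> simp [h1, h2]

-- lookup after A's inner loop, which modifies only the row at 'first'
theorem pv_A_inner_getD (first : String) (vals : String → Int) (ls : List String)
    (d : PySem.Dict String (PySem.Dict String Int)) (k : String) :
    (ls.foldl (fun res s => res.modify first PySem.Dict.empty (fun row => row.insert s (vals s))) d).getD k PySem.Dict.empty
      = if k = first then ls.foldl (fun row s => row.insert s (vals s)) (d.getD first PySem.Dict.empty)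
        else d.getD k PySem.Dict.empty := by
  induction ls generalizing d with
  | nil =>
      simp only [List.foldl_nil]
      split_ifs with h
      · rw [h]
      · rfl
  | cons c ls ih =>
      simp only [List.foldl_cons, ih, PySem.Dict.getD_modify]
      by_cases h : k = first <;> simp [h]

-- A's inner loop does not change the key list when 'first' is already a key
theorem pv_A_inner_keys (first : String) (vals : String → Int) (ls : List String)
    (d : PySem.Dict String (PySem.Dict String Int)) (h : first ∈ d.keys) :
    (ls.foldl (fun res s => res.modify first PySem.Dict.empty (fun row => row.insert s (vals s))) d).keys
      = d.keys := by
  induction ls generalizing d with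
  | nil => rfl
  | cons c ls ih =>
      have hstep : (d.modify first PySem.Dict.empty (fun row => row.insert c (vals c))).keys = d.keys := by
        rw [PySem.Dict.keys_modify,
            PySem.Dict.keys_insert_of_contains _ _ ((PySem.Dict.contains_iff_mem_keys d first).mpr h)]
      simp only [List.foldl_cons, ih _ (hstep ▸ h), hstep]

-- the keys of an inserted dict, as a Set.add
theorem pv_keys_insert {ν : Type} (d : PySem.Dict String ν) (k : String) (v : ν) :
    (d.insert k v).keys = PySem.Set.add d.keys k := by
  by_cases h : d.contains k = true
  · have hm : k ∈ d.keys := (PySem.Dict.contains_iff_mem_keys d k).mp h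
    rw [PySem.Dict.keys_insert_of_contains d v h]
    simp [PySem.Set.add, PySem.Set.contains, hm]
  · have hm : k ∉ d.keys := fun hmem => h ((PySem.Dict.contains_iff_mem_keys d k).mpr hmem)
    rw [PySem.Dict.keys_insert_of_not_contains d v (by simpa using h)]
    simp [PySem.Set.add, PySem.Set.contains, hm]

-- adding an element a set already has changes nothing
theorem pv_add_self (s : PySem.Set String) (x : String) (h : x ∈ s) : PySem.Set.add s x = s := by
  simp [PySem.Set.add, PySem.Set.contains, h]

-- keys of A's outer loop
theorem pv_A_outer_keys (letters : List String) (vals : String → String → Int) (ls : List String)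
    (d : PySem.Dict String (PySem.Dict String Int)) :
    (ls.foldl (fun res first =>
        letters.foldl (fun res s => res.modify first PySem.Dict.empty (fun row => row.insert s (vals first s)))
          (res.insert first PySem.Dict.empty)) d).keys
      = PySem.Set.update d.keys ls := by
  induction ls generalizing d with
  | nil => rfl
  | cons c ls ih =>
      simp only [List.foldl_cons, ih, PySem.Set.update_cons]
      rw [pv_A_inner_keys c (vals c) letters _ ((PySem.Dict.mem_keys_insert d c c PySem.Dict.empty).mpr (Or.inl rfl)),
          pv_keys_insert]

-- lookup after A's outer loop: each key of 'ls' gets the row rebuilt from scratch over 'letters'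
theorem pv_A_outer_getD (letters : List String) (vals : String → String → Int) (ls : List String)
    (d : PySem.Dict String (PySem.Dict String Int)) (k : String) :
    (ls.foldl (fun res first =>
        letters.foldl (fun res s => res.modify first PySem.Dict.empty (fun row => row.insert s (vals first s)))
          (res.insert first PySem.Dict.empty)) d).getD k PySem.Dict.empty
      = if k ∈ ls then letters.foldl (fun row s => row.insert s (vals k s)) PySem.Dict.empty
        else d.getD k PySem.Dict.empty := by
  induction ls generalizing d with
  | nil => simp
  | cons c ls ih =>
      simp only [List.foldl_cons, ih, List.mem_cons]
      rw [pv_A_inner_getD c (vals c) letters (d.insert c PySem.Dict.empty) k]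
      by_cases h1 : k ∈ ls
      · simp [h1]
      · by_cases h2 : k = c
        · subst h2; simp [h1, PySem.Dict.getD_insert_self]
        · simp [h1, h2, PySem.Dict.getD_insert d c k PySem.Dict.empty PySem.Dict.empty]

-- B's outer loop, with the branch pushed into the inserted value
theorem pv_B_outer_eq (ls : List String) (dash_row base : PySem.Dict String Int)
    (diag : Int) (d : PySem.Dict String (PySem.Dict String Int)) :
    (ls.foldl (fun res letter =>
        if letter = "-" then res.insert letter dash_row
        else res.insert letter (base.insert letter diag)) d)
      = ls.foldl (fun res letter =>
          res.insert letter (if letter = "-" then dash_row else base.insert letter diag)) d := by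
  have : (fun (res : PySem.Dict String (PySem.Dict String Int)) letter =>
        if letter = "-" then res.insert letter dash_row
        else res.insert letter (base.insert letter diag))
      = fun res letter => res.insert letter (if letter = "-" then dash_row else base.insert letter diag) := by
    funext res letter
    split_ifs <;> rfl
  rw [this]

-- a non-dash row of A equals the template row patched at the diagonal
theorem pv_row_eq_nondash (ls : List String) (diag off dash : Int) (k : String)
    (hk : k ∈ ls) (hd : "-" ∈ ls) (hkd : k ≠ "-") :
    ls.foldl (fun row s => row.insert s (if k = "-" ∨ s = "-" then dash else if k = s then diag else off)) PySem.Dict.empty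
      = ((ls.foldl (fun row s => row.insert s off) PySem.Dict.empty).insert "-" dash).insert k diag := by
  have hkeysL : (ls.foldl (fun row s => row.insert s (if k = "-" ∨ s = "-" then dash else if k = s then diag else off)) PySem.Dict.empty).keys = PySem.Set.ofList ls := by
    rw [PySem.Dict.keys_foldl_insert ls (fun _ s => if k = "-" ∨ s = "-" then dash else if k = s then diag else off)]
    simp [PySem.Set.update_nil_left]
  have hrow0 : (ls.foldl (fun row s => row.insert s off) PySem.Dict.empty).keys = PySem.Set.ofList ls := by
    rw [PySem.Dict.keys_foldl_insert ls (fun _ _ => off)]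
    simp [PySem.Set.update_nil_left]
  refine pv_dict_eq_of_keys_getD _ _ ?_ ?_ (0 : Int) ?_
  · rw [hkeysL, pv_keys_insert, pv_keys_insert, hrow0,
        pv_add_self _ "-" ((PySem.Set.mem_ofList ls "-").mpr hd),
        pv_add_self _ k ((PySem.Set.mem_ofList ls k).mpr hk)]
  · rw [hkeysL]; exact PySem.Set.nodup_ofList ls
  · intro s hs
    rw [hkeysL] at hs
    have hsls : s ∈ ls := (PySem.Set.mem_ofList ls s).mp hs
    rw [pv_getD_foldl_insert_fn (fun s => if k = "-" ∨ s = "-" then dash else if k = s then diag else off) ls PySem.Dict.empty s 0,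
        PySem.Dict.getD_insert, PySem.Dict.getD_insert,
        pv_getD_foldl_insert_fn (fun _ => off) ls PySem.Dict.empty s 0]
    by_cases h1 : s = "-"
    · simp [h1, hkd, Ne.symm hkd, hd]
    · by_cases h2 : k = s
      · simp [hsls, h1, h2]
      · simp [hsls, h1, h2, Ne.symm h2, hkd]

-- the dash row of A is the constant dash fold
theorem pv_row_eq_dash (ls : List String) (diag off dash : Int) :
    ls.foldl (fun row s => row.insert s (if ("-" : String) = "-" ∨ s = "-" then dash else if ("-" : String) = s then diag else off)) PySem.Dict.empty
      = ls.foldl (fun row s => row.insert s dash) PySem.Dict.empty := by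
  have : (fun (row : PySem.Dict String Int) s => row.insert s (if ("-" : String) = "-" ∨ s = "-" then dash else if ("-" : String) = s then diag else off))
      = fun row s => row.insert s dash := by
    funext row s; simp
  rw [this]

-- the two outer dicts are equal
theorem pv_main (alphabet : List String) (diag_score off_diag_score dash_score : Int) :
    ((alphabet ++ ["-"]).foldl (fun result first_letter =>
        (alphabet ++ ["-"]).foldl (fun result second_letter =>
          result.modify first_letter PySem.Dict.empty (fun row =>
            row.insert second_letter
              (if first_letter = "-" ∨ second_letter = "-" then dash_score
               else if first_letter = second_letter then diag_score
               else off_diag_score))) (result.insert first_letter PySem.Dict.empty)) PySem.Dict.empty)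
      = ((alphabet ++ ["-"]).foldl (fun res letter =>
          if letter = "-" then
            res.insert letter ((alphabet ++ ["-"]).foldl (fun d k => d.insert k dash_score) PySem.Dict.empty)
          else
            res.insert letter ((((alphabet ++ ["-"]).foldl (fun d k => d.insert k off_diag_score) PySem.Dict.empty).insert "-" dash_score).insert letter diag_score)) PySem.Dict.empty) := by
  have hd : "-" ∈ alphabet ++ ["-"] := by simp
  rw [pv_B_outer_eq]
  have hAkeys : ((alphabet ++ ["-"]).foldl (fun result first_letter =>
        (alphabet ++ ["-"]).foldl (fun result second_letter =>
          result.modify first_letter PySem.Dict.empty (fun row =>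
            row.insert second_letter
              (if first_letter = "-" ∨ second_letter = "-" then dash_score
               else if first_letter = second_letter then diag_score
               else off_diag_score))) (result.insert first_letter PySem.Dict.empty)) PySem.Dict.empty).keys
      = PySem.Set.ofList (alphabet ++ ["-"]) := by
    rw [pv_A_outer_keys (alphabet ++ ["-"])
        (fun first second => if first = "-" ∨ second = "-" then dash_score else if first = second then diag_score else off_diag_score)
        (alphabet ++ ["-"]) PySem.Dict.empty]
    simp [PySem.Set.update_nil_left]
  have hBkeys : ((alphabet ++ ["-"]).foldl (fun res letter =>
        res.insert letter (if letter = "-" then (alphabet ++ ["-"]).foldl (fun d k => d.insert k dash_score) PySem.Dict.empty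
          else (((alphabet ++ ["-"]).foldl (fun d k => d.insert k off_diag_score) PySem.Dict.empty).insert "-" dash_score).insert letter diag_score)) PySem.Dict.empty).keys
      = PySem.Set.ofList (alphabet ++ ["-"]) := by
    rw [PySem.Dict.keys_foldl_insert (alphabet ++ ["-"])
        (fun _ letter => if letter = "-" then (alphabet ++ ["-"]).foldl (fun d k => d.insert k dash_score) PySem.Dict.empty
          else (((alphabet ++ ["-"]).foldl (fun d k => d.insert k off_diag_score) PySem.Dict.empty).insert "-" dash_score).insert letter diag_score)]
    simp [PySem.Set.update_nil_left]
  refine pv_dict_eq_of_keys_getD _ _ ?_ ?_ PySem.Dict.empty ?_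
  · rw [hAkeys, hBkeys]
  · rw [hAkeys]; exact PySem.Set.nodup_ofList _
  · intro k hk
    rw [hAkeys] at hk
    have hkls : k ∈ alphabet ++ ["-"] := (PySem.Set.mem_ofList _ k).mp hk
    rw [pv_A_outer_getD (alphabet ++ ["-"])
        (fun first second => if first = "-" ∨ second = "-" then dash_score else if first = second then diag_score else off_diag_score)
        (alphabet ++ ["-"]) PySem.Dict.empty k, if_pos hkls,
        pv_getD_foldl_insert_fn
          (fun letter => if letter = "-" then (alphabet ++ ["-"]).foldl (fun d k => d.insert k dash_score) PySem.Dict.empty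
            else (((alphabet ++ ["-"]).foldl (fun d k => d.insert k off_diag_score) PySem.Dict.empty).insert "-" dash_score).insert letter diag_score)
          (alphabet ++ ["-"]) PySem.Dict.empty k PySem.Dict.empty, if_pos hkls]
    by_cases hkd : k = "-"
    · subst hkd
      exact pv_row_eq_dash (alphabet ++ ["-"]) diag_score off_diag_score dash_score
    · rw [if_neg hkd]
      exact pv_row_eq_nondash (alphabet ++ ["-"]) diag_score off_diag_score dash_score k hkls hd hkd

-- ===== VERDICT =====
theorem build_scoring_matrix_spec : Claim_equal_build_scoring_matrix := by
  intro alphabet diag_score off_diag_score dash_score _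
  show build_scoring_matrix alphabet diag_score off_diag_score dash_score
      = build_scoring_matrix_alt alphabet diag_score off_diag_score dash_score
  simp only [build_scoring_matrix, build_scoring_matrix_alt]
  exact congrArg _ (congrArg PySem.Dict.items (pv_main alphabet diag_score off_diag_score dash_score))
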